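-- pv_equiv track=rewrite | github.com/rodcoelho/python-practice | non_repetitive_string.py | find_rep
-- ===== SOURCE A (Python) =====
-- def find_rep(s):
--     payload = 1
--     d = {}
--     for i in range(len(s)):
--         if s[i] in d:
--             d[s[i]].append(i)
--         else:
--             d[s[i]] = [i]
--     for key, values in d.items():
--         if len(values) > 1:
--             if values[-1] - values[0] != len(values) - 1:
--                 payload = 0
--     return payload
-- ===== SOURCE B (Python) =====
-- def find_rep(s):
--     # One pass: a character reappearing after its run has ended means non-contiguous.
--     prev = None
--     finished = set()
--     for c in s:
--         if c != prev:
--             if prev is not None: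
--                 finished.add(prev)
--             if c in finished:
--                 return 0
--             prev = c
--     return 1
-- ===== Notes on version B (the rewrite author's own statement) =====
-- stated objective: faster
-- what changed: Replaces the dict of full index lists plus a second pass over all items by a single left-to-right scan keeping only the previous character and a set of characters whose run already ended, returning 0 immediately when a finished character reappears.
import Mathlib
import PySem

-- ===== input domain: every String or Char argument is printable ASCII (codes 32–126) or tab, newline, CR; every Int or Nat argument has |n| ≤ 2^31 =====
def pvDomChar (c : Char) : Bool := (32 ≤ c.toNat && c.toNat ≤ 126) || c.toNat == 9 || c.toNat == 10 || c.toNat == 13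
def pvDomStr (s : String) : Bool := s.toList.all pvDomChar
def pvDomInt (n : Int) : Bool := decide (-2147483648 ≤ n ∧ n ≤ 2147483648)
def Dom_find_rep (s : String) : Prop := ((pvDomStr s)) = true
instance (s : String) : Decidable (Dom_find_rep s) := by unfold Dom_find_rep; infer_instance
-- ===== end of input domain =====

-- B replaces A's dict of index lists + second pass by a single scan with a 'finished runs' set (early exit); return value equivalence is proved below.

-- ===== PORT A =====
-- loop body of A's first loop: if s[i] in d: d[s[i]].append(i) else: d[s[i]] = [i]
def buildStep (d : PySem.Dict Char (List Int)) (c : Char) (i : Int) : PySem.Dict Char (List Int) :=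
  match d.get? c with
  | some v => d.insert c (v ++ [i])               -- d[s[i]].append(i)
  | none => d.insert c [i]                        -- d[s[i]] = [i]

-- for i in range(len(s)): build d : char -> list of indices; then scan d.items()
def find_rep (s : String) : Int :=
  let d := (PySem.List.pyRange 0 (PySem.Str.len s) 1).foldl
    (fun d i => buildStep d (PySem.List.pyGetD s.toList i ' ') i)   -- s[i]; i ∈ range(len(s)) is always in range
    PySem.Dict.empty
  d.items.foldl
    (fun payload kv =>
      if 1 < (kv.2.length : Int) then
        if PySem.List.pyGetD kv.2 (-1) 0 - PySem.List.pyGetD kv.2 0 0 ≠ (kv.2.length : Int) - 1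
        then 0 else payload
      else payload)
    1

-- ===== PORT B =====
def goB : List Char → Option Char → PySem.Set Char → Int
  | [], _, _ => 1
  | c :: rest, prev, fin =>
    if some c ≠ prev then
      let fin' := match prev with
        | some p => PySem.Set.add fin p
        | none => fin
      if PySem.Set.contains fin' c then 0 else goB rest (some c) fin'
    else goB rest prev fin

def find_rep_alt (s : String) : Int := goB s.toList none PySem.Set.empty

-- ===== PRECONDITION & SPEC =====
def Spec_find_rep (s : String) (out : Int) : Prop := out = find_rep_alt s
instance (s : String) (out : Int) : Decidable (Spec_find_rep s out) := by unfold Spec_find_rep; infer_instance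

-- ===== CLAIM (what is proved, stated in full; the proofs are below) =====
def Claim_equal_find_rep : Prop := ∀ (s : String), Dom_find_rep s → Spec_find_rep s (find_rep s)

-- ===== LEMMAS AND PROOFS =====

-- destutter: collapse maximal runs of equal adjacent characters to one element
def dsAux (p : Char) : List Char → List Char
  | [] => []
  | c :: rest => if c = p then dsAux p rest else c :: dsAux c rest

def ds : List Char → List Char
  | [] => []
  | c :: rest => c :: dsAux c rest

-- indices (offset by k) of the occurrences of c
def occF (c : Char) (k : Int) : List Char → List Int
  | [] => []
  | a :: t => if a = c then k :: occF c (k + 1) t else occF c (k + 1) t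

def lst (v : List Int) : Int := v.getLastD 0
def hd (v : List Int) : Int := v.getD 0 0

-- the per-entry test of A's second loop
def badV (v : List Int) : Prop := 1 < (v.length : Int) ∧ lst v - hd v ≠ (v.length : Int) - 1

theorem pyGetD_neg_one_eq_lst (v : List Int) : PySem.List.pyGetD v (-1) 0 = lst v := by
  simp [PySem.List.pyGetD, PySem.List.pyGet?_neg_one, lst, List.getLastD_eq_getLast?]

theorem pyGetD_zero_eq_hd (v : List Int) : PySem.List.pyGetD v 0 0 = hd v := by
  simp [PySem.List.pyGetD_zero, hd]

theorem occF_shift (c : Char) : ∀ (t : List Char) (k : Int), occF c (k + 1) t = (occF c k t).map (· + 1)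
  | [], _ => rfl
  | a :: t, k => by
    by_cases h : a = c <;> simp [occF, h, occF_shift c t (k + 1)]

theorem occF_nil_iff (c : Char) : ∀ (t : List Char) (k : Int), occF c k t = [] ↔ c ∉ t
  | [], _ => by simp [occF]
  | a :: t, k => by
    rw [occF]
    by_cases h : a = c
    · simp [h]
    · rw [if_neg h, occF_nil_iff c t (k + 1)]
      simp only [List.mem_cons, not_or]
      exact ⟨fun hnt => ⟨fun hca => h hca.symm, hnt⟩, fun ⟨_, hnt⟩ => hnt⟩

theorem hd_cons (x : Int) (l : List Int) : hd (x :: l) = x := rfl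

theorem lst_singleton (x : Int) : lst [x] = x := rfl

theorem lst_cons (x : Int) (l : List Int) (h : l ≠ []) : lst (x :: l) = lst l := by
  cases l with
  | nil => exact absurd rfl h
  | cons b l' => simp [lst, List.getLastD_eq_getLast?, List.getLast?_cons_cons]

theorem lst_map_add (l : List Int) (h : l ≠ []) : lst (l.map (· + 1)) = lst l + 1 := by
  obtain ⟨y, hy⟩ := Option.isSome_iff_exists.mp (List.getLast?_isSome.mpr h)
  simp [lst, List.getLastD_eq_getLast?, List.getLast?_map, hy]

theorem hd_map_add (l : List Int) (h : l ≠ []) : hd (l.map (· + 1)) = hd l + 1 := by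
  cases l with
  | nil => exact absurd rfl h
  | cons b l' => rfl

-- head ≥ k and last ≥ head + len - 1 for a nonempty occurrence list
theorem occF_ineq (c : Char) : ∀ (t : List Char) (k : Int), occF c k t ≠ [] →
    k ≤ hd (occF c k t) ∧ hd (occF c k t) + ((occF c k t).length : Int) - 1 ≤ lst (occF c k t)
  | [], k => fun h => absurd rfl h
  | a :: t, k => by
    rw [occF]
    by_cases h : a = c
    · rw [if_pos h]
      intro _
      rcases eq_or_ne (occF c (k + 1) t) [] with hr | hr
      · simp [hr, hd_cons, lst_singleton]
      · obtain ⟨h1, h2⟩ := occF_ineq c t (k + 1) hr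
        rw [hd_cons, lst_cons k _ hr]
        have hlen : (occF c (k + 1) t).length ≠ 0 := fun hz => hr (List.eq_nil_of_length_eq_zero hz)
        constructor
        · omega
        · simp only [List.length_cons]
          push_cast
          omega
    · rw [if_neg h]
      intro hne
      obtain ⟨h1, h2⟩ := occF_ineq c t (k + 1) hne
      exact ⟨by omega, h2⟩

theorem count_dsAux (c : Char) : ∀ (t : List Char) (a : Char), c ≠ a → (dsAux a t).count c = (ds t).count c
  | [], _, _ => rfl
  | b :: t, a, hca => by
    by_cases h : b = a
    · subst h
      rw [dsAux]
      simp only [if_true]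
      rw [count_dsAux c t b hca, ds]
      cases t with
      | nil => simp [ds, dsAux, Ne.symm hca]
      | cons x t' =>
        rw [ds]
        by_cases hx : x = b <;>
          simp [dsAux, hx, List.count_cons, Ne.symm hca, count_dsAux c t' b hca, ds]
    · rw [dsAux, if_neg h, ds]

theorem mem_dsAux (c : Char) : ∀ (t : List Char) (p : Char), c ≠ p → (c ∈ dsAux p t ↔ c ∈ t)
  | [], _, _ => by simp [dsAux]
  | b :: t, p, hcp => by
    by_cases h : b = p
    · subst h
      rw [dsAux, if_pos rfl]
      simp [mem_dsAux c t b hcp, hcp]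
    · rw [dsAux, if_neg h]
      by_cases hcb : c = b
      · simp [hcb]
      · simp [hcb, mem_dsAux c t b hcb]

theorem mem_ds (c : Char) (t : List Char) : c ∈ ds t ↔ c ∈ t := by
  cases t with
  | nil => simp [ds]
  | cons b t =>
    rw [ds]
    by_cases hcb : c = b
    · simp [hcb]
    · simp [hcb, mem_dsAux c t b hcb]

theorem badV_map_add (l : List Int) : badV (l.map (· + 1)) ↔ badV l := by
  cases l with
  | nil => simp [badV]
  | cons x r =>
    have hne : (x :: r) ≠ [] := by simp
    unfold badV
    rw [lst_map_add _ hne, hd_map_add _ hne, List.length_map]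
    constructor <;> (rintro ⟨h1, h2⟩; exact ⟨h1, by omega⟩)

theorem badV_zero_cons_shift (l : List Int) (h0 : hd l = 0) :
    badV (0 :: l.map (· + 1)) ↔ badV l := by
  cases l with
  | nil => simp [badV, lst, hd]
  | cons x r =>
    have hx : x = 0 := h0
    subst hx
    cases r with
    | nil => simp [badV, lst, hd]
    | cons y r' =>
      have hner : (y :: r') ≠ [] := by simp
      simp only [List.map_cons]
      unfold badV
      rw [lst_cons _ _ (by simp), lst_cons _ _ (by simp)]
      rw [show ((y + 1) :: r'.map (· + 1) : List Int) = (y :: r').map (· + 1) from rfl,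
        lst_map_add _ hner]
      rw [lst_cons _ _ hner]
      simp only [hd_cons, List.length_cons, List.length_map]
      push_cast
      constructor <;> (rintro ⟨h1, h2⟩; exact ⟨by omega, by omega⟩)

-- the heart: A's per-character test ↔ c has at least two runs
theorem perChar (c : Char) : ∀ (cs : List Char), badV (occF c 0 cs) ↔ 2 ≤ (ds cs).count c
  | [] => by simp [occF, ds, badV, lst, hd]
  | a :: t => by
    by_cases hac : a = c
    · subst hac
      cases t with
      | nil => simp [occF, ds, dsAux, badV, lst, hd]
      | cons b t' =>
        by_cases hbc : b = a
        · subst hbc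
          have hL : occF b 0 (b :: b :: t') = 0 :: (occF b 0 (b :: t')).map (· + 1) := by
            rw [occF, if_pos rfl, show (0:Int) + 1 = 0 + 1 from rfl, occF_shift]
          have hR : (ds (b :: b :: t')).count b = (ds (b :: t')).count b := by
            rw [ds, ds, dsAux, if_pos rfl]
          rw [hL, hR, badV_zero_cons_shift _ (by rw [occF, if_pos rfl]; rfl)]
          exact perChar b (b :: t')
        · have hcb : a ≠ b := fun h => hbc h.symm
          have hL : occF a 0 (a :: b :: t') = 0 :: ((occF a 0 t').map (· + 1)).map (· + 1) := by
            rw [occF, if_pos rfl, occF, if_neg hbc, show (0:Int) + 1 + 1 = (0 + 1) + 1 from rfl,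
              occF_shift, occF_shift]
          have hR : (ds (a :: b :: t')).count a = 1 + (ds t').count a := by
            rw [ds, dsAux, if_neg hbc]
            simp [hbc, count_dsAux a t' b hcb]
            omega
          rw [hL, hR]
          rcases eq_or_ne (occF a 0 t') [] with hnil | hne
          · have hnotmem : a ∉ t' := (occF_nil_iff a t' 0).mp hnil
            have hz : (ds t').count a = 0 := by
              rw [List.count_eq_zero]
              exact fun hm => hnotmem ((mem_ds a t').mp hm)
            rw [hnil, hz]
            simp [badV, lst, hd]
          · obtain ⟨h1, h2⟩ := occF_ineq a t' 0 hne
            have hlp : 1 ≤ (occF a 0 t').length := List.length_pos_iff.mpr hne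
            have hmem : a ∈ t' := by
              by_contra hnm
              exact hne ((occF_nil_iff a t' 0).mpr hnm)
            have hcnt : 1 ≤ (ds t').count a :=
              List.count_pos_iff.mpr ((mem_ds a t').mpr hmem)
            have hmne : (occF a 0 t').map (· + 1) ≠ [] := by simp [hne]
            refine iff_of_true ⟨?_, ?_⟩ (by omega)
            · simp only [List.length_cons, List.length_map]
              push_cast
              omega
            · rw [lst_cons _ _ (by simpa using hne), lst_map_add _ hmne, lst_map_add _ hne]
              simp only [hd_cons, List.length_cons, List.length_map]
              push_cast
              omega
    · have hL : occF c 0 (a :: t) = (occF c 0 t).map (· + 1) := by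
        rw [occF, if_neg hac, show (0:Int) + 1 = 0 + 1 from rfl, occF_shift]
      have hR : (ds (a :: t)).count c = (ds t).count c := by
        simp [ds, hac, count_dsAux c t a (fun h => hac h.symm)]
      rw [hL, hR, badV_map_add]
      exact perChar c t

-- ===== A-side characterization =====
theorem occ_eq_occF (c : Char) : ∀ (cs : List Char) (k : Int),
    ((PySem.List.enumerate cs k).filter (fun p => p.2 == c)).map (·.1) = occF c k cs
  | [], k => by simp [PySem.List.enumerate, occF]
  | a :: t, k => by
    rw [occF]
    by_cases h : a = c <;>
      simp [PySem.List.enumerate, h, occ_eq_occF c t (k + 1)]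

def badb (v : List Int) : Bool :=
  decide (1 < (v.length : Int)) &&
    decide (PySem.List.pyGetD v (-1) 0 - PySem.List.pyGetD v 0 0 ≠ (v.length : Int) - 1)

theorem badb_iff (v : List Int) : badb v = true ↔ badV v := by
  simp [badb, badV, pyGetD_neg_one_eq_lst, pyGetD_zero_eq_hd]

theorem dict_step_eq (d : PySem.Dict Char (List Int)) (ch : Char) (i : Int) :
    buildStep d ch i = d.modify ch [] (· ++ [i]) := by
  rw [buildStep]
  cases h : d.get? ch <;>
    simp [PySem.Dict.modify, PySem.Dict.getD_eq_get?_getD, h]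

theorem foldl_payload (l : List (Char × List Int)) (init : Int) :
    l.foldl (fun payload kv =>
      if 1 < (kv.2.length : Int) then
        if PySem.List.pyGetD kv.2 (-1) 0 - PySem.List.pyGetD kv.2 0 0 ≠ (kv.2.length : Int) - 1
        then 0 else payload
      else payload) init
    = if l.any (fun kv => badb kv.2) then 0 else init := by
  induction l generalizing init with
  | nil => rfl
  | cons kv t ih =>
    rw [List.foldl_cons, List.any_cons, ih]
    by_cases h1 : 1 < (kv.2.length : Int)
    · by_cases h2 : PySem.List.pyGetD kv.2 (-1) 0 - PySem.List.pyGetD kv.2 0 0 ≠ (kv.2.length : Int) - 1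
      · simp [badb, h1, h2]
      · have hb : badb kv.2 = false := by simp [badb]; intro _; omega
        rw [hb, Bool.false_or]; simp [h1, not_not.mp h2]
    · have hb : badb kv.2 = false := by simp [badb]; intro h; omega
      rw [hb, Bool.false_or]; simp [h1]

theorem find_rep_char (s : String) : find_rep s = if (ds s.toList).Nodup then 1 else 0 := by
  have hfun : (fun (d : PySem.Dict Char (List Int)) (i : Int) =>
      buildStep d (PySem.List.pyGetD s.toList i ' ') i)
      = fun d i => d.modify (PySem.List.pyGetD s.toList i ' ') [] (· ++ [i]) :=
    funext fun d => funext fun i => dict_step_eq d _ i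
  have hlen : PySem.Str.len s = PySem.List.len s.toList := rfl
  set L := (PySem.List.enumerate s.toList 0).map (fun p => (p.2, p.1)) with hLdef
  have hdict : (PySem.List.pyRange 0 (PySem.Str.len s) 1).foldl
      (fun d i => buildStep d (PySem.List.pyGetD s.toList i ' ') i) PySem.Dict.empty
      = L.foldl (fun d q => d.modify q.1 [] (· ++ [q.2])) PySem.Dict.empty := by
    rw [hfun, hLdef, PySem.List.enumerate_eq_map_pyRange s.toList ' ', List.map_map,
      List.foldl_map, hlen]
    rfl
  set D := L.foldl (fun d q => d.modify q.1 [] (· ++ [q.2])) PySem.Dict.empty with hDdef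
  have hgetD : ∀ c : Char, D.getD c [] = occF c 0 s.toList := by
    intro c
    rw [hDdef, PySem.Dict.getD_foldl_modify_append, PySem.Dict.getD_empty, List.nil_append,
      hLdef, List.filter_map, List.map_map]
    have := occ_eq_occF c s.toList 0
    simpa [Function.comp] using this
  have hnd : D.keys.Nodup := by
    rw [hDdef]
    exact PySem.Dict.nodup_keys_foldl_modify_key L Prod.fst [] (fun _ q => (· ++ [q.2]))
      PySem.Dict.empty (by simp [PySem.Dict.keys_empty])
  have hkeys : D.keys = PySem.Set.ofList s.toList := by
    rw [hDdef, PySem.Dict.keys_foldl_modify_key L Prod.fst [] (fun _ q => (· ++ [q.2])),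
      PySem.Dict.keys_empty, PySem.Set.update_nil_left, hLdef, List.map_map]
    congr 1
    exact PySem.List.map_snd_enumerate s.toList 0
  rw [show find_rep s = ((PySem.List.pyRange 0 (PySem.Str.len s) 1).foldl
      (fun d i => buildStep d (PySem.List.pyGetD s.toList i ' ') i)
      PySem.Dict.empty).items.foldl
      (fun payload kv =>
        if 1 < (kv.2.length : Int) then
          if PySem.List.pyGetD kv.2 (-1) 0 - PySem.List.pyGetD kv.2 0 0 ≠ (kv.2.length : Int) - 1
          then 0 else payload
        else payload) 1 from rfl]
  rw [hdict, foldl_payload, PySem.Dict.items_eq_map_keys D hnd [], List.any_map]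
  have hcomp : ((fun kv : Char × List Int => badb kv.2) ∘ fun k => (k, D.getD k []))
      = fun k => badb (occF k 0 s.toList) := by
    funext k
    simp [Function.comp, hgetD k]
  rw [hcomp, hkeys]
  by_cases hnod : (ds s.toList).Nodup
  · rw [if_pos hnod]
    have hany : ((PySem.Set.ofList s.toList).any fun k => badb (occF k 0 s.toList)) = false := by
      rw [List.any_eq_false]
      intro c _ hbad
      have h2 := (perChar c s.toList).mp ((badb_iff _).mp hbad)
      have hle := List.nodup_iff_count_le_one.mp hnod c
      omega
    rw [hany]
    simp
  · rw [if_neg hnod]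
    have hex : ∃ c, 2 ≤ (ds s.toList).count c := by
      by_contra hno
      apply hnod
      rw [List.nodup_iff_count_le_one]
      intro a
      by_contra hgt
      exact hno ⟨a, by omega⟩
    obtain ⟨c, hc2⟩ := hex
    have hmem : c ∈ s.toList := (mem_ds c _).mp (List.count_pos_iff.mp (by omega))
    have hany : ((PySem.Set.ofList s.toList).any fun k => badb (occF k 0 s.toList)) = true :=
      List.any_eq_true.mpr ⟨c, (PySem.Set.mem_ofList _ _).mpr hmem,
        (badb_iff _).mpr ((perChar c _).mpr hc2)⟩
    rw [hany]
    simp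

-- ===== B-side characterization =====
def walk : List Char → Char → PySem.Set Char → Int
  | [], _, _ => 1
  | c :: rest, p, fin =>
    let fin' := PySem.Set.add fin p
    if PySem.Set.contains fin' c then 0 else walk rest c fin'

theorem goB_walk : ∀ (rest : List Char) (p : Char) (fin : PySem.Set Char),
    goB rest (some p) fin = walk (dsAux p rest) p fin
  | [], _, _ => rfl
  | c :: r, p, fin => by
    rw [goB, dsAux]
    by_cases h : c = p
    · simp only [h, ne_eq, not_true_eq_false, if_false]
      exact goB_walk r p fin
    · have hne : some c ≠ some p := by simpa using h
      simp only [if_neg h, if_pos hne, walk]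
      split_ifs with hx
      · rfl
      · exact goB_walk r c _

theorem walk_spec : ∀ (l : List Char) (p : Char) (fin : PySem.Set Char), (fin ++ [p]).Nodup →
    walk l p fin = if (fin ++ p :: l).Nodup then 1 else 0
  | [], p, fin => fun h => (if_pos h).symm
  | c :: r, p, fin => fun h => by
    have hpnot : p ∉ fin := by
      intro hm
      exact (List.disjoint_of_nodup_append h) hm (by simp)
    have hadd : PySem.Set.add fin p = fin ++ [p] := PySem.Set.add_of_not_mem hpnot
    rw [walk]
    by_cases hc : c ∈ fin ++ [p]
    · rw [if_pos (by rw [hadd]; simpa using hc)]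
      rw [if_neg]
      intro hnd
      rcases List.mem_append.mp hc with hcf | hcp
      · exact (List.disjoint_of_nodup_append hnd) hcf (by simp)
      · have hcp' : c = p := by simpa using hcp
        have := (List.nodup_append.mp hnd).2.1
        simp [hcp'] at this
    · rw [if_neg (by rw [hadd]; simpa using hc)]
      have hnd' : ((fin ++ [p]) ++ [c]).Nodup := by
        refine List.Nodup.append h (List.nodup_singleton c) ?_
        intro x hx hx'
        rw [List.mem_singleton] at hx'
        subst hx'
        exact hc hx
      rw [hadd, walk_spec r c (fin ++ [p]) hnd']
      have : (fin ++ [p]) ++ c :: r = fin ++ p :: c :: r := by simp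
      rw [this]

theorem find_rep_alt_char (s : String) : find_rep_alt s = if (ds s.toList).Nodup then 1 else 0 := by
  rw [find_rep_alt]
  cases hs : s.toList with
  | nil => simp [goB, ds]
  | cons c rest =>
    rw [goB]
    have hne : some c ≠ none := by simp
    rw [if_pos hne]
    have hcont : PySem.Set.contains (PySem.Set.empty : PySem.Set Char) c = false := rfl
    simp only [PySem.Set.empty] at *
    rw [hcont]
    simp only [Bool.false_eq_true, if_false]
    rw [goB_walk, walk_spec _ c [] (by simp), ds]
    simp

-- ===== VERDICT (by name: the statement is the Claim_ definition above) =====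
theorem find_rep_spec : Claim_equal_find_rep := by
  intro s _
  unfold Spec_find_rep
  rw [find_rep_char, find_rep_alt_char]
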